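-- pv_equiv track=rewrite | github.com/jingyueyueyueyue/moegal-honyaku | manga_translator/server/runtime_api.py | build_runtime_api_overrides
-- ===== SOURCE A (Python) =====
-- from typing import Optional
--
-- RUNTIME_API_ENV_PRIORITY = {
--     "ocr": {
--         "openai": {
--             "api_key": ["OCR_OPENAI_API_KEY"],
--             "api_base": ["OCR_OPENAI_API_BASE"],
--             "model": ["OCR_OPENAI_MODEL"],
--         },
--         "gemini": {
--             "api_key": ["OCR_GEMINI_API_KEY"],
--             "api_base": ["OCR_GEMINI_API_BASE"],
--             "model": ["OCR_GEMINI_MODEL"],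
--         },
--     },
--     "colorizer": {
--         "openai": {
--             "api_key": ["COLOR_OPENAI_API_KEY"],
--             "api_base": ["COLOR_OPENAI_API_BASE"],
--             "model": ["COLOR_OPENAI_MODEL"],
--         },
--         "gemini": {
--             "api_key": ["COLOR_GEMINI_API_KEY"],
--             "api_base": ["COLOR_GEMINI_API_BASE"],
--             "model": ["COLOR_GEMINI_MODEL"],
--         },
--     },
--     "renderer": {
--         "openai": {
--             "api_key": ["RENDER_OPENAI_API_KEY"],
--             "api_base": ["RENDER_OPENAI_API_BASE"],
--             "model": ["RENDER_OPENAI_MODEL"],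
--         },
--         "gemini": {
--             "api_key": ["RENDER_GEMINI_API_KEY"],
--             "api_base": ["RENDER_GEMINI_API_BASE"],
--             "model": ["RENDER_GEMINI_MODEL"],
--         },
--     },
-- }
--
-- def _pick_first_env(env_vars: dict, candidates: list[str]) -> Optional[str]:
--     for key in candidates:
--         value = env_vars.get(key)
--         if value:
--             return str(value)
--     return None
--
-- def build_runtime_api_overrides(env_vars: Optional[dict]) -> dict[str, dict[str, dict[str, str]]]:
--     env_vars = {
--         str(key): str(value)
--         for key, value in (env_vars or {}).items()
--         if key and value
--     }
--     overrides: dict[str, dict[str, dict[str, str]]] = {}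
--     for feature, providers in RUNTIME_API_ENV_PRIORITY.items():
--         feature_overrides: dict[str, dict[str, str]] = {}
--         for provider, field_map in providers.items():
--             provider_overrides = {
--                 field_name: value
--                 for field_name, candidates in field_map.items()
--                 if (value := _pick_first_env(env_vars, candidates))
--             }
--             if provider_overrides:
--                 feature_overrides[provider] = provider_overrides
--         if feature_overrides:
--             overrides[feature] = feature_overrides
--     return overrides
-- ===== SOURCE B (Python) =====
-- # B inverts the data flow: instead of walking the nested priority table and probing the
-- # environment for every field, it scans the environment ONCE against a reverse index
-- # (env-var name -> leaf number), collects the matched leaves, and then rebuilds the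
-- # nested dict from the sorted leaf numbers, so table order is preserved and parent
-- # dicts are created only when a leaf exists (identical pruning).
-- RUNTIME_API_ENV_PRIORITY = {
--     "ocr": {
--         "openai": {
--             "api_key": ["OCR_OPENAI_API_KEY"],
--             "api_base": ["OCR_OPENAI_API_BASE"],
--             "model": ["OCR_OPENAI_MODEL"],
--         },
--         "gemini": {
--             "api_key": ["OCR_GEMINI_API_KEY"],
--             "api_base": ["OCR_GEMINI_API_BASE"],
--             "model": ["OCR_GEMINI_MODEL"],
--         },
--     },
--     "colorizer": {
--         "openai": {
--             "api_key": ["COLOR_OPENAI_API_KEY"],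
--             "api_base": ["COLOR_OPENAI_API_BASE"],
--             "model": ["COLOR_OPENAI_MODEL"],
--         },
--         "gemini": {
--             "api_key": ["COLOR_GEMINI_API_KEY"],
--             "api_base": ["COLOR_GEMINI_API_BASE"],
--             "model": ["COLOR_GEMINI_MODEL"],
--         },
--     },
--     "renderer": {
--         "openai": {
--             "api_key": ["RENDER_OPENAI_API_KEY"],
--             "api_base": ["RENDER_OPENAI_API_BASE"],
--             "model": ["RENDER_OPENAI_MODEL"],
--         },
--         "gemini": {
--             "api_key": ["RENDER_GEMINI_API_KEY"],
--             "api_base": ["RENDER_GEMINI_API_BASE"],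
--             "model": ["RENDER_GEMINI_MODEL"],
--         },
--     },
-- }
--
-- # flat leaf list in table order; every candidate list of the table holds exactly one name
-- _PATHS = [
--     (feature, provider, field, candidates[0])
--     for feature, providers in RUNTIME_API_ENV_PRIORITY.items()
--     for provider, field_map in providers.items()
--     for field, candidates in field_map.items()
-- ]
--
-- # reverse index: env-var name -> leaf number in _PATHS
-- _INDEX = {name: i for i, (_, _, _, name) in enumerate(_PATHS)}
--
--
-- def build_runtime_api_overrides(env_vars):
--     found = {}
--     for key, value in (env_vars or {}).items():
--         k, v = str(key), str(value)
--         if k and v: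
--             i = _INDEX.get(k)
--             if i is not None:
--                 found[i] = v
--     overrides = {}
--     for i in sorted(found):
--         feature, provider, field, _ = _PATHS[i]
--         overrides.setdefault(feature, {}).setdefault(provider, {})[field] = found[i]
--     return overrides
-- ===== Notes on version B (the rewrite author's own statement) =====
-- stated objective: alternative
-- what changed: B inverts the data flow: instead of walking the nested priority table and probing the env dict for every field, it scans the environment once against a precomputed reverse index (env-var name -> leaf number), collects matched leaf values, and rebuilds the nested dict from the sorted leaf numbers, which preserves table order and the empty-dict pruning.
import Mathlib
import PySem

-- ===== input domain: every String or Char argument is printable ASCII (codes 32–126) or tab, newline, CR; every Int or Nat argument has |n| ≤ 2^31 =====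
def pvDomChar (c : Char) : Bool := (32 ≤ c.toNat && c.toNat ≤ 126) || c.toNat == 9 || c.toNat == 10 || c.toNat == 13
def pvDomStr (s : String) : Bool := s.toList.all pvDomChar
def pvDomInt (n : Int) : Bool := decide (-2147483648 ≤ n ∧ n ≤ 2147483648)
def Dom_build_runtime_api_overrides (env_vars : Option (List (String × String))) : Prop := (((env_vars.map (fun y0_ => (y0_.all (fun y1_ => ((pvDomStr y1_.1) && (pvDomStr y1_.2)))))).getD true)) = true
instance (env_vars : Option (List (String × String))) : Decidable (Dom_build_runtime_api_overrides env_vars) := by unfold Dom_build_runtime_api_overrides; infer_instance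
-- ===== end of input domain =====

-- B inverts the data flow: instead of walking the nested priority table and probing the
-- environment per field, it scans the environment once against a reverse index
-- (env-var name -> leaf number) and rebuilds the nested dict from the sorted leaf
-- numbers (objective: alternative; same cost).

-- ===== PORT A =====

-- the module constant RUNTIME_API_ENV_PRIORITY (a dict of dicts of dicts, in source order)
def apiTable : List (String × List (String × List (String × List String))) :=
  [("ocr",
     [("openai", [("api_key", ["OCR_OPENAI_API_KEY"]), ("api_base", ["OCR_OPENAI_API_BASE"]), ("model", ["OCR_OPENAI_MODEL"])]),
      ("gemini", [("api_key", ["OCR_GEMINI_API_KEY"]), ("api_base", ["OCR_GEMINI_API_BASE"]), ("model", ["OCR_GEMINI_MODEL"])])]),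
   ("colorizer",
     [("openai", [("api_key", ["COLOR_OPENAI_API_KEY"]), ("api_base", ["COLOR_OPENAI_API_BASE"]), ("model", ["COLOR_OPENAI_MODEL"])]),
      ("gemini", [("api_key", ["COLOR_GEMINI_API_KEY"]), ("api_base", ["COLOR_GEMINI_API_BASE"]), ("model", ["COLOR_GEMINI_MODEL"])])]),
   ("renderer",
     [("openai", [("api_key", ["RENDER_OPENAI_API_KEY"]), ("api_base", ["RENDER_OPENAI_API_BASE"]), ("model", ["RENDER_OPENAI_MODEL"])]),
      ("gemini", [("api_key", ["RENDER_GEMINI_API_KEY"]), ("api_base", ["RENDER_GEMINI_API_BASE"]), ("model", ["RENDER_GEMINI_MODEL"])])])]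

-- _pick_first_env: first candidate whose env value is truthy (nonempty)
def pickFirstEnv (env : PySem.Dict String String) : List String → Option String
  | [] => none
  | k :: rest =>
      match env.get? k with
      | some v => if v ≠ "" then some v else pickFirstEnv env rest
      | none => pickFirstEnv env rest

-- {str(k): str(v) for k, v in (env_vars or {}).items() if k and v}
def normEnvA (env_vars : Option (List (String × String))) : PySem.Dict String String :=
  ((PySem.Dict.ofList (env_vars.getD [])).items).foldl
    (fun d kv => if kv.1 ≠ "" ∧ kv.2 ≠ "" then d.insert kv.1 kv.2 else d) PySem.Dict.empty

def aProvOverrides (env : PySem.Dict String String) (field_map : List (String × List String)) :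
    List (String × String) :=
  field_map.foldl
    (fun pa fc =>
      match pickFirstEnv env fc.2 with
      | some v => pa ++ [(fc.1, v)]
      | none => pa) []

def aFeatOverrides (env : PySem.Dict String String) (providers : List (String × List (String × List String))) :
    List (String × List (String × String)) :=
  providers.foldl
    (fun fa pf =>
      let po := aProvOverrides env pf.2
      if po = [] then fa else fa ++ [(pf.1, po)]) []

def build_runtime_api_overrides (env_vars : Option (List (String × String))) : List (String × List (String × List (String × String))) :=
  let env := normEnvA env_vars
  apiTable.foldl
    (fun ov fp =>
      let fo := aFeatOverrides env fp.2
      if fo = [] then ov else ov ++ [(fp.1, fo)]) []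

-- ===== PORT B =====

-- B's copy of the module constant RUNTIME_API_ENV_PRIORITY
def apiTableB : List (String × List (String × List (String × List String))) :=
  [("ocr",
     [("openai", [("api_key", ["OCR_OPENAI_API_KEY"]), ("api_base", ["OCR_OPENAI_API_BASE"]), ("model", ["OCR_OPENAI_MODEL"])]),
      ("gemini", [("api_key", ["OCR_GEMINI_API_KEY"]), ("api_base", ["OCR_GEMINI_API_BASE"]), ("model", ["OCR_GEMINI_MODEL"])])]),
   ("colorizer",
     [("openai", [("api_key", ["COLOR_OPENAI_API_KEY"]), ("api_base", ["COLOR_OPENAI_API_BASE"]), ("model", ["COLOR_OPENAI_MODEL"])]),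
      ("gemini", [("api_key", ["COLOR_GEMINI_API_KEY"]), ("api_base", ["COLOR_GEMINI_API_BASE"]), ("model", ["COLOR_GEMINI_MODEL"])])]),
   ("renderer",
     [("openai", [("api_key", ["RENDER_OPENAI_API_KEY"]), ("api_base", ["RENDER_OPENAI_API_BASE"]), ("model", ["RENDER_OPENAI_MODEL"])]),
      ("gemini", [("api_key", ["RENDER_GEMINI_API_KEY"]), ("api_base", ["RENDER_GEMINI_API_BASE"]), ("model", ["RENDER_GEMINI_MODEL"])])])]

-- _PATHS: flat leaf list in table order ('candidates[0]' ported as headD, exact on the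
-- table's nonempty candidate lists)
def pathsB : List (String × String × String × String) :=
  apiTableB.flatMap (fun fp => fp.2.flatMap (fun pf => pf.2.map (fun fc => (fp.1, pf.1, fc.1, fc.2.headD ""))))

-- _INDEX = {name: i for i, (_, _, _, name) in enumerate(_PATHS)}
def indexB : PySem.Dict String Int :=
  (PySem.List.enumerate pathsB 0).foldl (fun d p => d.insert p.2.2.2.2 p.1) PySem.Dict.empty

-- body of B's first loop: one env item matched against the reverse index
def collectStep (found : PySem.Dict Int String) (kv : String × String) : PySem.Dict Int String :=
  if kv.1 ≠ "" ∧ kv.2 ≠ "" then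
    match indexB.get? kv.1 with
    | some i => found.insert i kv.2
    | none => found
  else found

-- d.setdefault/overwrite on an association list: the first matching key gets its value
-- transformed in place, a missing key is appended with the default
def assocUpd {β : Type} (m : List (String × β)) (k : String) (fn : β → β) (d : β) : List (String × β) :=
  match m with
  | [] => [(k, d)]
  | (k', v) :: rest => if k' = k then (k', fn v) :: rest else (k', v) :: assocUpd rest k fn d

def upd1 (m : List (String × String)) (fld v : String) : List (String × String) :=
  assocUpd m fld (fun _ => v) v

def upd2 (m : List (String × List (String × String))) (p fld v : String) : List (String × List (String × String)) :=
  assocUpd m p (fun s => upd1 s fld v) (upd1 [] fld v)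

-- overrides.setdefault(feature, {}).setdefault(provider, {})[field] = v
def upd3 (m : List (String × List (String × List (String × String)))) (f p fld v : String) :
    List (String × List (String × List (String × String))) :=
  assocUpd m f (fun s => upd2 s p fld v) (upd2 [] p fld v)

-- body of B's emission loop: one sorted leaf number i ('_PATHS[i]' / 'found[i]' ported
-- totally; both always hit)
def emitStep (found : PySem.Dict Int String) (ov : List (String × List (String × List (String × String)))) (i : Int) :
    List (String × List (String × List (String × String))) :=
  match PySem.List.pyGet? pathsB i, found.get? i with
  | some q, some v => upd3 ov q.1 q.2.1 q.2.2.1 v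
  | _, _ => ov

def build_runtime_api_overrides_alt (env_vars : Option (List (String × String))) : List (String × List (String × List (String × String))) :=
  let found := ((PySem.Dict.ofList (env_vars.getD [])).items).foldl collectStep PySem.Dict.empty
  (PySem.List.sorted found.keys (fun x => x) false).foldl (emitStep found) []

-- ===== PRECONDITION & SPEC =====
def Spec_build_runtime_api_overrides (env_vars : Option (List (String × String))) (out : List (String × List (String × List (String × String)))) : Prop := out = build_runtime_api_overrides_alt env_vars
instance (env_vars : Option (List (String × String))) (out : List (String × List (String × List (String × String)))) : Decidable (Spec_build_runtime_api_overrides env_vars out) := by unfold Spec_build_runtime_api_overrides; infer_instance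

-- ===== CLAIM (what is proved, stated in full; the proofs are below) =====
def Claim_equal_build_runtime_api_overrides : Prop := ∀ (env_vars : Option (List (String × String))), Dom_build_runtime_api_overrides env_vars → Spec_build_runtime_api_overrides env_vars (build_runtime_api_overrides env_vars)

-- ===== LEMMAS AND PROOFS =====

-- closed forms of A's three pruning levels, parameterized over the candidate picker g

def h1 (g : List String → Option String) (fc : String × List String) : Option (String × String) :=
  (g fc.2).map (fun v => (fc.1, v))

def prov1 (g : List String → Option String) (fs : List (String × List String)) : List (String × String) :=
  fs.filterMap (h1 g)

def h2 (g : List String → Option String) (pf : String × List (String × List String)) :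
    Option (String × List (String × String)) :=
  if prov1 g pf.2 = [] then none else some (pf.1, prov1 g pf.2)

def feat2 (g : List String → Option String) (ps : List (String × List (String × List String))) :
    List (String × List (String × String)) :=
  ps.filterMap (h2 g)

def h3 (g : List String → Option String) (fp : String × List (String × List (String × List String))) :
    Option (String × List (String × List (String × String))) :=
  if feat2 g fp.2 = [] then none else some (fp.1, feat2 g fp.2)

def nest3 (g : List String → Option String) (t : List (String × List (String × List (String × List String)))) :
    List (String × List (String × List (String × String))) :=
  t.filterMap (h3 g)

-- ---- A-side: the append-folds are filterMaps ----

theorem foldl_opt_append {β γ : Type} (h : γ → Option β) (L : List γ) (acc : List β) :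
    L.foldl (fun fa x => (h x).elim fa (fun y => fa ++ [y])) acc = acc ++ L.filterMap h := by
  induction L generalizing acc with
  | nil => simp
  | cons x rest ih =>
      cases hx : h x with
      | none => simp [hx, ih]
      | some y => simp [hx, ih]

theorem aProv_eq (env : PySem.Dict String String) (fs : List (String × List String)) :
    aProvOverrides env fs = prov1 (pickFirstEnv env) fs := by
  have hfun : (fun (pa : List (String × String)) (fc : String × List String) =>
      match pickFirstEnv env fc.2 with | some v => pa ++ [(fc.1, v)] | none => pa) =
      (fun pa fc => (h1 (pickFirstEnv env) fc).elim pa (fun y => pa ++ [y])) := by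
    funext pa fc; cases hx : pickFirstEnv env fc.2 <;> simp [h1, hx]
  unfold aProvOverrides
  rw [hfun]
  simpa [prov1] using foldl_opt_append (h1 (pickFirstEnv env)) fs []

theorem aFeat_eq (env : PySem.Dict String String) (ps : List (String × List (String × List String))) :
    aFeatOverrides env ps = feat2 (pickFirstEnv env) ps := by
  have hfun : (fun (fa : List (String × List (String × String))) (pf : String × List (String × List String)) =>
      if aProvOverrides env pf.2 = [] then fa else fa ++ [(pf.1, aProvOverrides env pf.2)]) =
      (fun fa pf => (h2 (pickFirstEnv env) pf).elim fa (fun y => fa ++ [y])) := by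
    funext fa pf
    simp only [aProv_eq, h2]
    by_cases hpo : prov1 (pickFirstEnv env) pf.2 = [] <;> simp [hpo]
  simp only [aFeatOverrides]
  rw [hfun]
  simpa [feat2] using foldl_opt_append (h2 (pickFirstEnv env)) ps []

theorem A_eq (env_vars : Option (List (String × String))) :
    build_runtime_api_overrides env_vars = nest3 (pickFirstEnv (normEnvA env_vars)) apiTable := by
  have hfun : (fun (ov : List (String × List (String × List (String × String))))
      (fp : String × List (String × List (String × List String))) =>
      if aFeatOverrides (normEnvA env_vars) fp.2 = [] then ov
      else ov ++ [(fp.1, aFeatOverrides (normEnvA env_vars) fp.2)]) =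
      (fun ov fp => (h3 (pickFirstEnv (normEnvA env_vars)) fp).elim ov (fun y => ov ++ [y])) := by
    funext ov fp
    simp only [aFeat_eq, h3]
    by_cases hfo : feat2 (pickFirstEnv (normEnvA env_vars)) fp.2 = [] <;> simp [hfo]
  simp only [build_runtime_api_overrides]
  rw [hfun]
  simpa [nest3] using foldl_opt_append (h3 (pickFirstEnv (normEnvA env_vars))) apiTable []

-- ---- the literal shape of B's reverse index ----

-- leaf number -> env-var name of that leaf (the inverse of _INDEX, written out)
def nameAt (i : Int) : Option String :=
  if i = 0 then some "OCR_OPENAI_API_KEY" else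
  if i = 1 then some "OCR_OPENAI_API_BASE" else
  if i = 2 then some "OCR_OPENAI_MODEL" else
  if i = 3 then some "OCR_GEMINI_API_KEY" else
  if i = 4 then some "OCR_GEMINI_API_BASE" else
  if i = 5 then some "OCR_GEMINI_MODEL" else
  if i = 6 then some "COLOR_OPENAI_API_KEY" else
  if i = 7 then some "COLOR_OPENAI_API_BASE" else
  if i = 8 then some "COLOR_OPENAI_MODEL" else
  if i = 9 then some "COLOR_GEMINI_API_KEY" else
  if i = 10 then some "COLOR_GEMINI_API_BASE" else
  if i = 11 then some "COLOR_GEMINI_MODEL" else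
  if i = 12 then some "RENDER_OPENAI_API_KEY" else
  if i = 13 then some "RENDER_OPENAI_API_BASE" else
  if i = 14 then some "RENDER_OPENAI_MODEL" else
  if i = 15 then some "RENDER_GEMINI_API_KEY" else
  if i = 16 then some "RENDER_GEMINI_API_BASE" else
  if i = 17 then some "RENDER_GEMINI_MODEL" else none

set_option maxHeartbeats 2000000 in
theorem indexB_lit : indexB = PySem.Dict.mk
    [("OCR_OPENAI_API_KEY", (0 : Int)), ("OCR_OPENAI_API_BASE", 1), ("OCR_OPENAI_MODEL", 2),
     ("OCR_GEMINI_API_KEY", 3), ("OCR_GEMINI_API_BASE", 4), ("OCR_GEMINI_MODEL", 5),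
     ("COLOR_OPENAI_API_KEY", 6), ("COLOR_OPENAI_API_BASE", 7), ("COLOR_OPENAI_MODEL", 8),
     ("COLOR_GEMINI_API_KEY", 9), ("COLOR_GEMINI_API_BASE", 10), ("COLOR_GEMINI_MODEL", 11),
     ("RENDER_OPENAI_API_KEY", 12), ("RENDER_OPENAI_API_BASE", 13), ("RENDER_OPENAI_MODEL", 14),
     ("RENDER_GEMINI_API_KEY", 15), ("RENDER_GEMINI_API_BASE", 16), ("RENDER_GEMINI_MODEL", 17)] := by
  rfl

theorem indexB_items : indexB.items =
    [("OCR_OPENAI_API_KEY", (0 : Int)), ("OCR_OPENAI_API_BASE", 1), ("OCR_OPENAI_MODEL", 2),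
     ("OCR_GEMINI_API_KEY", 3), ("OCR_GEMINI_API_BASE", 4), ("OCR_GEMINI_MODEL", 5),
     ("COLOR_OPENAI_API_KEY", 6), ("COLOR_OPENAI_API_BASE", 7), ("COLOR_OPENAI_MODEL", 8),
     ("COLOR_GEMINI_API_KEY", 9), ("COLOR_GEMINI_API_BASE", 10), ("COLOR_GEMINI_MODEL", 11),
     ("RENDER_OPENAI_API_KEY", 12), ("RENDER_OPENAI_API_BASE", 13), ("RENDER_OPENAI_MODEL", 14),
     ("RENDER_GEMINI_API_KEY", 15), ("RENDER_GEMINI_API_BASE", 16), ("RENDER_GEMINI_MODEL", 17)] := by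
  rw [indexB_lit]

set_option maxHeartbeats 1000000 in
theorem lemA (n : String) (i : Int) (h : indexB.get? n = some i) : nameAt i = some n := by
  have hm : (n, i) ∈ indexB.items := PySem.Dict.mem_items_of_get?_eq_some indexB h
  rw [indexB_items] at hm
  fin_cases hm <;> rfl

theorem nameAt_eq_none (i : Int) (hi : ¬(0 ≤ i ∧ i < 18)) : nameAt i = none := by
  unfold nameAt
  rw [if_neg (show ¬(i = 0) by omega)]
  rw [if_neg (show ¬(i = 1) by omega)]
  rw [if_neg (show ¬(i = 2) by omega)]
  rw [if_neg (show ¬(i = 3) by omega)]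
  rw [if_neg (show ¬(i = 4) by omega)]
  rw [if_neg (show ¬(i = 5) by omega)]
  rw [if_neg (show ¬(i = 6) by omega)]
  rw [if_neg (show ¬(i = 7) by omega)]
  rw [if_neg (show ¬(i = 8) by omega)]
  rw [if_neg (show ¬(i = 9) by omega)]
  rw [if_neg (show ¬(i = 10) by omega)]
  rw [if_neg (show ¬(i = 11) by omega)]
  rw [if_neg (show ¬(i = 12) by omega)]
  rw [if_neg (show ¬(i = 13) by omega)]
  rw [if_neg (show ¬(i = 14) by omega)]
  rw [if_neg (show ¬(i = 15) by omega)]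
  rw [if_neg (show ¬(i = 16) by omega)]
  rw [if_neg (show ¬(i = 17) by omega)]

theorem lemR (i : Int) (n : String) (h : nameAt i = some n) : 0 ≤ i ∧ i < 18 := by
  by_contra hc
  rw [nameAt_eq_none i hc] at h
  cases h

set_option maxHeartbeats 1000000 in
theorem lemB (i : Int) (n : String) (h : nameAt i = some n) : indexB.get? n = some i := by
  obtain ⟨hl, hr⟩ := lemR i n h
  interval_cases i <;> (simp [nameAt] at h; subst_vars; rw [indexB_lit]; rfl)

-- ---- the invariant of B's collection loop ----

theorem collect_step (d : PySem.Dict String String) (f : PySem.Dict Int String) (kv : String × String)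
    (hnd : f.keys.Nodup) (hch : ∀ i, f.get? i = (nameAt i).bind d.get?) :
    (collectStep f kv).keys.Nodup ∧
    ∀ i, (collectStep f kv).get? i =
      (nameAt i).bind (if kv.1 ≠ "" ∧ kv.2 ≠ "" then d.insert kv.1 kv.2 else d).get? := by
  by_cases htr : kv.1 ≠ "" ∧ kv.2 ≠ ""
  · simp only [collectStep, if_pos htr]
    cases hidx : indexB.get? kv.1 with
    | none =>
        refine ⟨hnd, fun i => ?_⟩
        rw [hch i]
        cases hn : nameAt i with
        | none => simp
        | some n =>
            have hne : n ≠ kv.1 := by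
              intro he
              rw [he] at hn
              rw [lemB i kv.1 hn] at hidx
              cases hidx
            simp [PySem.Dict.get?_insert_of_ne d kv.2 hne]
    | some j =>
        refine ⟨PySem.Dict.nodup_keys_insert f j kv.2 hnd, fun i => ?_⟩
        by_cases hij : i = j
        · subst hij
          rw [PySem.Dict.get?_insert_self]
          rw [lemA kv.1 i hidx]
          simp [PySem.Dict.get?_insert_self]
        · rw [PySem.Dict.get?_insert_of_ne f kv.2 hij, hch i]
          cases hn : nameAt i with
          | none => simp
          | some n =>
              have hne : n ≠ kv.1 := by
                intro he
                rw [he] at hn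
                rw [lemB i kv.1 hn] at hidx
                exact hij (Option.some.inj hidx)
              simp [PySem.Dict.get?_insert_of_ne d kv.2 hne]
  · simp only [collectStep, if_neg htr]
    exact ⟨hnd, fun i => hch i⟩

theorem fold_inv (L : List (String × String)) :
    ∀ (d : PySem.Dict String String) (f : PySem.Dict Int String),
      f.keys.Nodup → (∀ i, f.get? i = (nameAt i).bind d.get?) →
      (L.foldl collectStep f).keys.Nodup ∧
      ∀ i, (L.foldl collectStep f).get? i =
        (nameAt i).bind
          (L.foldl (fun d kv => if kv.1 ≠ "" ∧ kv.2 ≠ "" then d.insert kv.1 kv.2 else d) d).get? := by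
  induction L with
  | nil => intro d f hnd hch; exact ⟨hnd, hch⟩
  | cons kv rest ih =>
      intro d f hnd hch
      obtain ⟨hnd', hch'⟩ := collect_step d f kv hnd hch
      simpa using ih (if kv.1 ≠ "" ∧ kv.2 ≠ "" then d.insert kv.1 kv.2 else d) (collectStep f kv) hnd' hch'

-- ---- normalized env values are truthy ----

theorem vals_ne (L : List (String × String)) :
    ∀ (d : PySem.Dict String String), (∀ k v, d.get? k = some v → v ≠ "") →
    ∀ k v, (L.foldl (fun d kv => if kv.1 ≠ "" ∧ kv.2 ≠ "" then d.insert kv.1 kv.2 else d) d).get? k = some v → v ≠ "" := by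
  induction L with
  | nil => intro d h; exact h
  | cons kv rest ih =>
      intro d h k v
      simp only [List.foldl_cons]
      refine ih _ ?_ k v
      intro k' v' h'
      by_cases htr : kv.1 ≠ "" ∧ kv.2 ≠ ""
      · rw [if_pos htr] at h'
        by_cases hk : k' = kv.1
        · subst hk
          rw [PySem.Dict.get?_insert_self] at h'
          cases h'
          exact htr.2
        · rw [PySem.Dict.get?_insert_of_ne d kv.2 hk] at h'
          exact h k' v' h'
      · rw [if_neg htr] at h'
        exact h k' v' h'

theorem pick_singleton (env_vars : Option (List (String × String))) (n : String) :
    pickFirstEnv (normEnvA env_vars) [n] = (normEnvA env_vars).get? n := by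
  have hv := vals_ne ((PySem.Dict.ofList (env_vars.getD [])).items) PySem.Dict.empty
    (by intro k v h; rw [PySem.Dict.get?_empty] at h; cases h)
  cases h : (normEnvA env_vars).get? n with
  | none => simp [pickFirstEnv, h]
  | some v =>
      have : v ≠ "" := hv n v h
      simp [pickFirstEnv, h, this]

-- ---- B-side: emission over the sorted leaf numbers ----

-- the (candidate-list) flat view of the table, matched with A's nested pruning below
def flatTable : List (String × String × String × List String) :=
  apiTable.flatMap (fun fp => fp.2.flatMap (fun pf => pf.2.map (fun fc => (fp.1, pf.1, fc.1, fc.2))))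

def flat1 (g : List String → Option String) (L : List (String × List String)) (acc : List (String × String)) :
    List (String × String) :=
  L.foldl (fun s l => match g l.2 with | some v => upd1 s l.1 v | none => s) acc

def flat2 (g : List String → Option String) (L : List (String × String × List String))
    (acc : List (String × List (String × String))) : List (String × List (String × String)) :=
  L.foldl (fun s l => match g l.2.2 with | some v => upd2 s l.1 l.2.1 v | none => s) acc

def flat3 (g : List String → Option String) (L : List (String × String × String × List String))
    (acc : List (String × List (String × List (String × String)))) :
    List (String × List (String × List (String × String))) :=
  L.foldl (fun ov leaf => match g leaf.2.2.2 with | some v => upd3 ov leaf.1 leaf.2.1 leaf.2.2.1 v | none => ov) acc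

def leaves2 (ps : List (String × List (String × List String))) : List (String × String × List String) :=
  ps.flatMap (fun pf => pf.2.map (fun fc => (pf.1, fc.1, fc.2)))

def keysOf {β : Type} (m : List (String × β)) : List String := m.map Prod.fst

@[simp] theorem keysOf_nil {β : Type} : keysOf ([] : List (String × β)) = [] := rfl
@[simp] theorem keysOf_cons {β : Type} (kv : String × β) (m : List (String × β)) :
    keysOf (kv :: m) = kv.1 :: keysOf m := rfl
@[simp] theorem keysOf_append {β : Type} (a b : List (String × β)) :
    keysOf (a ++ b) = keysOf a ++ keysOf b := by simp [keysOf]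

theorem assocUpd_fresh {β : Type} (m : List (String × β)) (k : String) (fn : β → β) (d : β)
    (h : k ∉ keysOf m) : assocUpd m k fn d = m ++ [(k, d)] := by
  induction m with
  | nil => simp [assocUpd]
  | cons kv rest ih =>
      obtain ⟨k', v⟩ := kv
      simp only [keysOf_cons, List.mem_cons] at h
      push_neg at h
      simp [assocUpd, Ne.symm h.1, ih h.2]

theorem assocUpd_append_fresh {β : Type} (acc m : List (String × β)) (k : String) (fn : β → β) (d : β)
    (h : k ∉ keysOf acc) : assocUpd (acc ++ m) k fn d = acc ++ assocUpd m k fn d := by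
  induction acc with
  | nil => simp
  | cons kv rest ih =>
      obtain ⟨k', v⟩ := kv
      simp only [keysOf_cons, List.mem_cons] at h
      push_neg at h
      simp [assocUpd, Ne.symm h.1, ih h.2]

theorem assocUpd_hit_last {β : Type} (acc : List (String × β)) (k : String) (sub : β) (fn : β → β) (d : β)
    (h : k ∉ keysOf acc) : assocUpd (acc ++ [(k, sub)]) k fn d = acc ++ [(k, fn sub)] := by
  rw [assocUpd_append_fresh acc [(k, sub)] k fn d h]
  simp [assocUpd]

theorem assocUpd_ne_nil {β : Type} (m : List (String × β)) (k : String) (fn : β → β) (d : β) :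
    assocUpd m k fn d ≠ [] := by
  cases m with
  | nil => simp [assocUpd]
  | cons kv rest =>
      obtain ⟨k', v⟩ := kv
      simp only [assocUpd]
      split <;> simp

-- ---- level 1 ----

theorem flat1_cons_some (g : List String → Option String) (l : String × List String)
    (L : List (String × List String)) (acc : List (String × String)) (v : String)
    (hx : g l.2 = some v) : flat1 g (l :: L) acc = flat1 g L (upd1 acc l.1 v) := by
  simp [flat1, hx]

theorem flat1_cons_none (g : List String → Option String) (l : String × List String)
    (L : List (String × List String)) (acc : List (String × String))
    (hx : g l.2 = none) : flat1 g (l :: L) acc = flat1 g L acc := by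
  simp [flat1, hx]

theorem flat1_ne_nil (g : List String → Option String) (L : List (String × List String))
    (m : List (String × String)) (h : m ≠ []) : flat1 g L m ≠ [] := by
  induction L generalizing m with
  | nil => exact h
  | cons l rest ih =>
      cases hx : g l.2 with
      | none => rw [flat1_cons_none g l rest m hx]; exact ih m h
      | some v => rw [flat1_cons_some g l rest m v hx]; exact ih _ (assocUpd_ne_nil _ _ _ _)

theorem flat1_fresh (g : List String → Option String) (fs : List (String × List String))
    (acc : List (String × String)) (hnd : (fs.map Prod.fst).Nodup)
    (hdisj : ∀ fc ∈ fs, fc.1 ∉ keysOf acc) :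
    flat1 g fs acc = acc ++ prov1 g fs := by
  induction fs generalizing acc with
  | nil => simp [flat1, prov1]
  | cons fc rest ih =>
      simp only [List.map_cons, List.nodup_cons] at hnd
      cases hx : g fc.2 with
      | none =>
          rw [flat1_cons_none g fc rest acc hx,
              ih acc hnd.2 (fun x hx' => hdisj x (List.mem_cons_of_mem _ hx'))]
          simp [prov1, h1, hx]
      | some v =>
          have hfr : upd1 acc fc.1 v = acc ++ [(fc.1, v)] :=
            assocUpd_fresh acc fc.1 _ v (hdisj fc (List.mem_cons_self ..))
          rw [flat1_cons_some g fc rest acc v hx, hfr, ih (acc ++ [(fc.1, v)]) hnd.2 ?_]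
          · simp [prov1, h1, hx]
          · intro x hx'
            simp only [keysOf_append, List.mem_append, keysOf_cons, keysOf_nil, List.mem_cons]
            push_neg
            refine ⟨hdisj x (List.mem_cons_of_mem _ hx'), ?_, by simp⟩
            intro hxe
            exact hnd.1 (hxe ▸ List.mem_map_of_mem hx')

-- ---- level 2 ----

theorem flat2_cons_some (g : List String → Option String) (l : String × String × List String)
    (L : List (String × String × List String)) (acc : List (String × List (String × String))) (v : String)
    (hx : g l.2.2 = some v) : flat2 g (l :: L) acc = flat2 g L (upd2 acc l.1 l.2.1 v) := by
  simp [flat2, hx]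

theorem flat2_cons_none (g : List String → Option String) (l : String × String × List String)
    (L : List (String × String × List String)) (acc : List (String × List (String × String)))
    (hx : g l.2.2 = none) : flat2 g (l :: L) acc = flat2 g L acc := by
  simp [flat2, hx]

theorem flat2_append (g : List String → Option String) (a b : List (String × String × List String))
    (acc : List (String × List (String × String))) :
    flat2 g (a ++ b) acc = flat2 g b (flat2 g a acc) := List.foldl_append ..

theorem flat2_ne_nil (g : List String → Option String) (L : List (String × String × List String))
    (m : List (String × List (String × String))) (h : m ≠ []) : flat2 g L m ≠ [] := by
  induction L generalizing m with
  | nil => exact h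
  | cons l rest ih =>
      cases hx : g l.2.2 with
      | none => rw [flat2_cons_none g l rest m hx]; exact ih m h
      | some v => rw [flat2_cons_some g l rest m v hx]; exact ih _ (assocUpd_ne_nil _ _ _ _)

theorem flat2_group_hit (g : List String → Option String) (p : String) (fs : List (String × List String))
    (acc : List (String × List (String × String))) (sub : List (String × String))
    (h : p ∉ keysOf acc) :
    flat2 g (fs.map (fun fc => (p, fc.1, fc.2))) (acc ++ [(p, sub)]) = acc ++ [(p, flat1 g fs sub)] := by
  induction fs generalizing sub with
  | nil => simp [flat2, flat1]
  | cons fc rest ih =>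
      rw [List.map_cons]
      cases hx : g fc.2 with
      | none =>
          rw [flat2_cons_none g (p, fc.1, fc.2) _ _ hx, flat1_cons_none g fc rest sub hx]
          exact ih sub
      | some v =>
          rw [flat2_cons_some g (p, fc.1, fc.2) _ _ v hx, flat1_cons_some g fc rest sub v hx]
          have hit : upd2 (acc ++ [(p, sub)]) p fc.1 v = acc ++ [(p, upd1 sub fc.1 v)] :=
            assocUpd_hit_last acc p sub _ _ h
          rw [show upd2 (acc ++ [(p, sub)]) (p, fc.1, fc.2).1 (p, fc.1, fc.2).2.1 v
                = acc ++ [(p, upd1 sub fc.1 v)] from hit]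
          exact ih (upd1 sub fc.1 v)

theorem flat2_group (g : List String → Option String) (p : String) (fs : List (String × List String))
    (acc : List (String × List (String × String))) (h : p ∉ keysOf acc) :
    flat2 g (fs.map (fun fc => (p, fc.1, fc.2))) acc =
      (if flat1 g fs [] = [] then acc else acc ++ [(p, flat1 g fs [])]) := by
  induction fs with
  | nil => simp [flat2, flat1]
  | cons fc rest ih =>
      rw [List.map_cons]
      cases hx : g fc.2 with
      | none =>
          rw [flat2_cons_none g (p, fc.1, fc.2) _ _ hx, flat1_cons_none g fc rest [] hx]
          exact ih
      | some v =>
          rw [flat2_cons_some g (p, fc.1, fc.2) _ _ v hx, flat1_cons_some g fc rest [] v hx]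
          have hstep : upd2 acc p fc.1 v = acc ++ [(p, upd1 [] fc.1 v)] :=
            assocUpd_fresh acc p _ _ h
          rw [show upd2 acc (p, fc.1, fc.2).1 (p, fc.1, fc.2).2.1 v
                = acc ++ [(p, upd1 [] fc.1 v)] from hstep,
              flat2_group_hit g p rest acc (upd1 [] fc.1 v) h]
          have hne : flat1 g rest (upd1 [] fc.1 v) ≠ [] :=
            flat1_ne_nil g rest _ (assocUpd_ne_nil _ _ _ _)
          rw [if_neg hne]

theorem flat2_leaves (g : List String → Option String) (ps : List (String × List (String × List String)))
    (acc : List (String × List (String × String)))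
    (hnd : (ps.map Prod.fst).Nodup)
    (hdisj : ∀ pf ∈ ps, pf.1 ∉ keysOf acc)
    (hin : ∀ pf ∈ ps, (pf.2.map Prod.fst).Nodup) :
    flat2 g (leaves2 ps) acc = acc ++ feat2 g ps := by
  induction ps generalizing acc with
  | nil => simp [leaves2, flat2, feat2]
  | cons pf rest ih =>
      obtain ⟨p, fs⟩ := pf
      simp only [List.map_cons, List.nodup_cons] at hnd
      have hpacc : p ∉ keysOf acc := hdisj (p, fs) (List.mem_cons_self ..)
      have hfs : (fs.map Prod.fst).Nodup := hin (p, fs) (List.mem_cons_self ..)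
      have hleaves : leaves2 ((p, fs) :: rest) = fs.map (fun fc => (p, fc.1, fc.2)) ++ leaves2 rest := by
        simp [leaves2]
      rw [hleaves, flat2_append, flat2_group g p fs acc hpacc]
      have hpo : flat1 g fs [] = prov1 g fs :=
        flat1_fresh g fs [] hfs (by simp)
      rw [hpo]
      by_cases hemp : prov1 g fs = []
      · rw [if_pos hemp,
            ih acc hnd.2 (fun x hx => hdisj x (List.mem_cons_of_mem _ hx))
              (fun x hx => hin x (List.mem_cons_of_mem _ hx))]
        simp [feat2, h2, hemp]
      · rw [if_neg hemp,
            ih (acc ++ [(p, prov1 g fs)]) hnd.2 ?_ (fun x hx => hin x (List.mem_cons_of_mem _ hx))]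
        · simp [feat2, h2, hemp]
        · intro x hx
          simp only [keysOf_append, List.mem_append, keysOf_cons, keysOf_nil, List.mem_cons]
          push_neg
          refine ⟨hdisj x (List.mem_cons_of_mem _ hx), ?_, by simp⟩
          intro hxe
          exact hnd.1 (hxe ▸ List.mem_map_of_mem hx)

-- ---- level 3 ----

theorem flat3_cons_some (g : List String → Option String) (l : String × String × String × List String)
    (L : List (String × String × String × List String))
    (acc : List (String × List (String × List (String × String)))) (v : String)
    (hx : g l.2.2.2 = some v) :
    flat3 g (l :: L) acc = flat3 g L (upd3 acc l.1 l.2.1 l.2.2.1 v) := by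
  simp [flat3, hx]

theorem flat3_cons_none (g : List String → Option String) (l : String × String × String × List String)
    (L : List (String × String × String × List String))
    (acc : List (String × List (String × List (String × String))))
    (hx : g l.2.2.2 = none) : flat3 g (l :: L) acc = flat3 g L acc := by
  simp [flat3, hx]

theorem flat3_append (g : List String → Option String) (a b : List (String × String × String × List String))
    (acc : List (String × List (String × List (String × String)))) :
    flat3 g (a ++ b) acc = flat3 g b (flat3 g a acc) := List.foldl_append ..

theorem flat3_group_hit (g : List String → Option String) (f : String)
    (L : List (String × String × List String))
    (acc : List (String × List (String × List (String × String)))) (sub : List (String × List (String × String)))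
    (h : f ∉ keysOf acc) :
    flat3 g (L.map (fun l => (f, l))) (acc ++ [(f, sub)]) = acc ++ [(f, flat2 g L sub)] := by
  induction L generalizing sub with
  | nil => simp [flat3, flat2]
  | cons l rest ih =>
      rw [List.map_cons]
      cases hx : g l.2.2 with
      | none =>
          rw [flat3_cons_none g (f, l) _ _ hx, flat2_cons_none g l rest sub hx]
          exact ih sub
      | some v =>
          rw [flat3_cons_some g (f, l) _ _ v hx, flat2_cons_some g l rest sub v hx]
          have hit : upd3 (acc ++ [(f, sub)]) f l.1 l.2.1 v = acc ++ [(f, upd2 sub l.1 l.2.1 v)] :=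
            assocUpd_hit_last acc f sub _ _ h
          rw [show upd3 (acc ++ [(f, sub)]) (f, l).1 (f, l).2.1 (f, l).2.2.1 v
                = acc ++ [(f, upd2 sub l.1 l.2.1 v)] from hit]
          exact ih (upd2 sub l.1 l.2.1 v)

theorem flat3_group (g : List String → Option String) (f : String)
    (L : List (String × String × List String))
    (acc : List (String × List (String × List (String × String)))) (h : f ∉ keysOf acc) :
    flat3 g (L.map (fun l => (f, l))) acc =
      (if flat2 g L [] = [] then acc else acc ++ [(f, flat2 g L [])]) := by
  induction L with
  | nil => simp [flat3, flat2]
  | cons l rest ih =>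
      rw [List.map_cons]
      cases hx : g l.2.2 with
      | none =>
          rw [flat3_cons_none g (f, l) _ _ hx, flat2_cons_none g l rest [] hx]
          exact ih
      | some v =>
          rw [flat3_cons_some g (f, l) _ _ v hx, flat2_cons_some g l rest [] v hx]
          have hstep : upd3 acc f l.1 l.2.1 v = acc ++ [(f, upd2 [] l.1 l.2.1 v)] :=
            assocUpd_fresh acc f _ _ h
          rw [show upd3 acc (f, l).1 (f, l).2.1 (f, l).2.2.1 v
                = acc ++ [(f, upd2 [] l.1 l.2.1 v)] from hstep,
              flat3_group_hit g f rest acc (upd2 [] l.1 l.2.1 v) h]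
          have hne : flat2 g rest (upd2 [] l.1 l.2.1 v) ≠ [] :=
            flat2_ne_nil g rest _ (assocUpd_ne_nil _ _ _ _)
          rw [if_neg hne]

theorem flat3_leaves (g : List String → Option String)
    (t : List (String × List (String × List (String × List String))))
    (acc : List (String × List (String × List (String × String))))
    (hnd : (t.map Prod.fst).Nodup)
    (hdisj : ∀ fp ∈ t, fp.1 ∉ keysOf acc)
    (hin : ∀ fp ∈ t, ((fp.2.map Prod.fst).Nodup ∧ ∀ pf ∈ fp.2, (pf.2.map Prod.fst).Nodup)) :
    flat3 g (t.flatMap (fun fp => (leaves2 fp.2).map (fun l => (fp.1, l)))) acc = acc ++ nest3 g t := by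
  induction t generalizing acc with
  | nil => simp [flat3, nest3]
  | cons fp rest ih =>
      obtain ⟨f, ps⟩ := fp
      simp only [List.map_cons, List.nodup_cons] at hnd
      have hfacc : f ∉ keysOf acc := hdisj (f, ps) (List.mem_cons_self ..)
      have hcur := hin (f, ps) (List.mem_cons_self ..)
      rw [List.flatMap_cons, flat3_append, flat3_group g f (leaves2 ps) acc hfacc]
      have hfo : flat2 g (leaves2 ps) [] = feat2 g ps :=
        flat2_leaves g ps [] hcur.1 (by simp) hcur.2
      rw [hfo]
      by_cases hemp : feat2 g ps = []
      · rw [if_pos hemp,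
            ih acc hnd.2 (fun x hx => hdisj x (List.mem_cons_of_mem _ hx))
              (fun x hx => hin x (List.mem_cons_of_mem _ hx))]
        simp [nest3, h3, hemp]
      · rw [if_neg hemp,
            ih (acc ++ [(f, feat2 g ps)]) hnd.2 ?_ (fun x hx => hin x (List.mem_cons_of_mem _ hx))]
        · simp [nest3, h3, hemp]
        · intro x hx
          simp only [keysOf_append, List.mem_append, keysOf_cons, keysOf_nil, List.mem_cons]
          push_neg
          refine ⟨hdisj x (List.mem_cons_of_mem _ hx), ?_, by simp⟩
          intro hxe
          exact hnd.1 (hxe ▸ List.mem_map_of_mem hx)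

-- ---- the emission fold equals flat3 over the flat table ----

def L18 : List Int := [0, 1, 2, 3, 4, 5, 6, 7, 8, 9, 10, 11, 12, 13, 14, 15, 16, 17]

-- the leaf numbers zipped with the (candidate-list) leaves, in table order
def Z18 : List (Int × (String × String × String × List String)) :=
  L18.zip flatTable

theorem emit_bridge (g : List String → Option String) (found : PySem.Dict Int String) (i : Int)
    (f p fld n : String) (cands : List String)
    (hpy : PySem.List.pyGet? pathsB i = some (f, p, fld, n)) (hf : found.get? i = g cands)
    (ov : List (String × List (String × List (String × String)))) :
    emitStep found ov i = flat3 g [(f, p, fld, cands)] ov := by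
  simp only [emitStep, flat3, List.foldl_cons, List.foldl_nil, hpy, hf]
  cases g cands <;> rfl

theorem foldEmit_eq_flat3 (g : List String → Option String) (found : PySem.Dict Int String) :
    ∀ (ps : List (Int × (String × String × String × List String))),
      (∀ q ∈ ps, ∀ ov, emitStep found ov q.1 = flat3 g [q.2] ov) →
      ∀ acc, (ps.map Prod.fst).foldl (emitStep found) acc = flat3 g (ps.map Prod.snd) acc := by
  intro ps
  induction ps with
  | nil => intro _ acc; rfl
  | cons q rest ih =>
      intro h acc
      rw [List.map_cons, List.map_cons, List.foldl_cons,
          ih (fun x hx => h x (List.mem_cons_of_mem _ hx)),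
          h q (List.mem_cons_self ..)]
      simp [flat3]

theorem emit_none (found : PySem.Dict Int String) (ov : List (String × List (String × List (String × String))))
    (i : Int) (h : found.get? i = none) : emitStep found ov i = ov := by
  simp only [emitStep, h]
  cases PySem.List.pyGet? pathsB i <;> rfl

-- ===== the two sides are equal =====

theorem B_eq (env_vars : Option (List (String × String))) :
    build_runtime_api_overrides_alt env_vars = nest3 (pickFirstEnv (normEnvA env_vars)) apiTable := by
  obtain ⟨hnd, hch⟩ := fold_inv ((PySem.Dict.ofList (env_vars.getD [])).items) PySem.Dict.empty PySem.Dict.empty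
    PySem.Dict.nodup_keys_empty
    (by intro i; cases nameAt i <;> simp [PySem.Dict.get?_empty])
  set env := normEnvA env_vars with henv
  set found := ((PySem.Dict.ofList (env_vars.getD [])).items).foldl collectStep PySem.Dict.empty with hfound
  have hch : ∀ i, found.get? i = (nameAt i).bind env.get? := hch
  have hpick : ∀ n, pickFirstEnv env [n] = env.get? n := pick_singleton env_vars
  -- the sorted key list is the filtered literal range
  have hmemL18 : ∀ i : Int, i ∈ L18 ↔ 0 ≤ i ∧ i < 18 := by
    intro i; simp only [L18, List.mem_cons, List.not_mem_nil, or_false]; omega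
  have hsort : PySem.List.sorted found.keys (fun x => x) false
      = L18.filter (fun i => (found.get? i).isSome) := by
    apply PySem.List.sorted_eq_of_perm_of_pairwise_lt
    · rw [List.perm_ext_iff_of_nodup (List.Nodup.filter _ (by decide)) hnd]
      intro i
      rw [List.mem_filter]
      have hk : i ∈ found.keys ↔ (found.get? i).isSome = true := by
        rw [← PySem.Dict.contains_iff_mem_keys, PySem.Dict.contains_eq_isSome_get?]
      rw [hk]
      constructor
      · rintro ⟨_, h⟩; exact h
      · intro h
        refine ⟨?_, h⟩
        rw [hch i] at h
        cases hn : nameAt i with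
        | none => rw [hn] at h; simp at h
        | some n => exact (hmemL18 i).mpr (lemR i n hn)
    · exact List.Pairwise.filter _ (by decide)
  -- the whole claim
  show (PySem.List.sorted found.keys (fun x => x) false).foldl (emitStep found) []
      = nest3 (pickFirstEnv env) apiTable
  rw [hsort]
  rw [← PySem.List.foldl_if_eq_foldl_filter (fun i => (found.get? i).isSome) (emitStep found)]
  have hcongr :
      L18.foldl (fun acc x => if (found.get? x).isSome = true then emitStep found acc x else acc) [] =
      L18.foldl (emitStep found) [] := by
    apply PySem.List.foldl_congr_mem
    intro acc x _
    by_cases hx : (found.get? x).isSome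
    · rw [if_pos hx]
    · rw [if_neg hx]
      exact (emit_none found acc x (by
        cases h : found.get? x
        · rfl
        · rw [h] at hx; simp at hx)).symm
  rw [hcongr]
  have hz1 : Z18.map Prod.fst = L18 := by rfl
  have hz2 : Z18.map Prod.snd = flatTable := by rfl
  rw [← hz1, foldEmit_eq_flat3 (pickFirstEnv env) found Z18 ?_, hz2]
  · have := flat3_leaves (pickFirstEnv env) apiTable [] (by decide) (by simp) (by decide)
    have hft : flatTable = apiTable.flatMap (fun fp => (leaves2 fp.2).map (fun l => (fp.1, l))) := by
      rfl
    rw [hft, this]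
    simp
  · intro q hq
    fin_cases hq <;>
      exact fun ov => emit_bridge (pickFirstEnv env) found _ _ _ _ _ _ rfl
        (by rw [hch, hpick]; rfl) ov

-- ===== VERDICT (by name: the statement is the Claim_ definition above) =====
theorem build_runtime_api_overrides_spec : Claim_equal_build_runtime_api_overrides := by
  intro env_vars _
  unfold Spec_build_runtime_api_overrides
  rw [A_eq, B_eq]
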